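-- pv_equiv track=rewrite | github.com/liliumka/py_basics | Ivanova_Tatiana_dz_4/my_tools.py | my_cycle
-- ===== SOURCE A (Python) =====
-- def my_cycle(data, amount=0):
--     """
--     Генератор на основе итератора cycle.
--
--     На каждой итерации выдает элемент последовательности data бесконечно, повторяя сначала, когда закончился перебор.
--     Для выхода из цикла используется параметр amount. Если он не задан, срабатывает ограничение в 10 итераций.
--
--     :param str|list|tuple|set data:
--     :param int amount:
--     :return:
--     """
--     from itertools import cycle
--
--     if not amount > 0:
--         amount = 10
--     c = 0
--     for el in cycle(data):
--         c += 1
--         if c > amount: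
--             break
--         yield el
-- ===== SOURCE B (Python) =====
-- def my_cycle(data, amount=0):
--     """Bulk construction: q full copies of the sequence plus one partial slice,
--     instead of any per-element cycling loop."""
--     if not amount > 0:
--         amount = 10
--     items = list(data)
--     if items:
--         q, r = divmod(amount, len(items))
--         yield from items * q
--         yield from items[:r]
-- ===== Notes on version B (the rewrite author's own statement) =====
-- stated objective: alternative
-- what changed: Replaces the per-element itertools.cycle loop with counter/break by bulk construction: divmod splits amount into q full copies and a remainder slice, and the output is items*q followed by items[:r] (whole-list replication + one slice, no element-by-element cycling loop).
import Mathlib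
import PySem

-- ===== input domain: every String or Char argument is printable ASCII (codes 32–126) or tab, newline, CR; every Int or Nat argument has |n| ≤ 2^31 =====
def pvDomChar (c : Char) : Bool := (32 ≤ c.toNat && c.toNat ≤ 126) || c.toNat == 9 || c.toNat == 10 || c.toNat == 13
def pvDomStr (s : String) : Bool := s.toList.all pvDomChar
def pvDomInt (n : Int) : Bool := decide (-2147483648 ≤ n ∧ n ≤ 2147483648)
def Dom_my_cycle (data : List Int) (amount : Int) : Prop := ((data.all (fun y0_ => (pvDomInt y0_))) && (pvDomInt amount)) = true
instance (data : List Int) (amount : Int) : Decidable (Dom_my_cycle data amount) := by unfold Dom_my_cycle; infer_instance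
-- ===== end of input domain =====

-- B builds the output in bulk (q whole copies of the list plus one remainder slice, via divmod)
-- instead of A's per-element cycle loop with a counter; same cost, plainer construction.

-- ===== PORT A =====
-- the 'for el in cycle(data)' loop: `rest` is the unconsumed part of the current pass of the
-- cycle iterator; `k` is the number of yields still allowed (amount - c). cycle([]) yields nothing.
def myCycleLoopA (data : List Int) : List Int → Nat → List Int
  | _, 0 => []
  | x :: rs, Nat.succ k => x :: myCycleLoopA data rs k
  | [], Nat.succ k =>
      match data with
      | [] => []
      | x :: rs => x :: myCycleLoopA data rs k

def my_cycle (data : List Int) (amount : Int) : List Int :=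
  let amount := if ¬ amount > 0 then 10 else amount
  myCycleLoopA data data amount.toNat

-- ===== PORT B =====
-- divmod(amount, n): amount is positive after the guard and n > 0, so Python's divmod
-- coincides with Nat division/remainder here (exact on this domain).
def my_cycle_alt (data : List Int) (amount : Int) : List Int :=
  let amount := if ¬ amount > 0 then 10 else amount
  let items := data
  if items = [] then []
  else
    let q := amount.toNat / items.length
    let r := amount.toNat % items.length
    (List.replicate q items).flatten ++ items.take r   -- items * q  then  items[:r]

-- ===== PRECONDITION & SPEC =====
def Spec_my_cycle (data : List Int) (amount : Int) (out : List Int) : Prop := out = my_cycle_alt data amount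
instance (data : List Int) (amount : Int) (out : List Int) : Decidable (Spec_my_cycle data amount out) := by unfold Spec_my_cycle; infer_instance

-- ===== CLAIM (what is proved, stated in full; the proofs are below) =====
def Claim_equal_my_cycle : Prop := ∀ (data : List Int) (amount : Int), Dom_my_cycle data amount → Spec_my_cycle data amount (my_cycle data amount)

-- ===== LEMMAS AND PROOFS =====

-- one pass of the loop: consume `rest`, then restart from `data`
theorem myCycleLoopA_pass (data : List Int) (hd : data ≠ []) :
    ∀ (rest : List Int) (k : Nat),
      myCycleLoopA data rest k
        = if k ≤ rest.length then rest.take k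
          else rest ++ myCycleLoopA data data (k - rest.length) := by
  intro rest
  induction rest with
  | nil =>
    intro k
    cases k with
    | zero => rfl
    | succ k =>
      simp only [List.length_nil, Nat.succ_le_iff, List.nil_append, Nat.sub_zero]
      cases data with
      | nil => exact absurd rfl hd
      | cons x rs => rfl
  | cons x rs ih =>
    intro k
    cases k with
    | zero => simp [myCycleLoopA]
    | succ k =>
      simp only [myCycleLoopA, ih k, List.length_cons]
      split_ifs with h1 h2 h2 <;> simp_all <;> omega

-- full characterisation: k yields from the cycle = ⌊k/n⌋ whole copies plus a take of the rest
theorem myCycleLoopA_closed (data : List Int) (hd : data ≠ []) (k : Nat) :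
    myCycleLoopA data data k
      = (List.replicate (k / data.length) data).flatten ++ data.take (k % data.length) := by
  have hn : 0 < data.length := List.length_pos_iff.mpr hd
  induction k using Nat.strong_induction_on with
  | _ k ih =>
    rw [myCycleLoopA_pass data hd data k]
    by_cases hk : k ≤ data.length
    · rcases Nat.lt_or_eq_of_le hk with hlt | heq
      · rw [if_pos hk, Nat.div_eq_of_lt hlt, Nat.mod_eq_of_lt hlt]
        simp
      · rw [if_pos hk, heq, Nat.div_self hn, Nat.mod_self]
        simp
    · rw [Nat.not_le] at hk
      rw [if_neg (by omega), ih (k - data.length) (by omega)]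
      rw [Nat.div_eq_sub_div hn (le_of_lt hk), Nat.mod_eq_sub_mod (le_of_lt hk)]
      simp [List.replicate_succ, List.append_assoc]

-- ===== VERDICT (by name: the statement is the Claim_ definition above) =====
theorem my_cycle_spec : Claim_equal_my_cycle := by
  unfold Claim_equal_my_cycle
  intro data amount _
  unfold Spec_my_cycle my_cycle my_cycle_alt
  by_cases hd : data = []
  · subst hd
    have h : ∀ k, myCycleLoopA [] [] k = [] := fun k => by cases k <;> rfl
    simp [h]
  · simp only [if_neg hd]
    exact myCycleLoopA_closed data hd _
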